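-- pv_equiv track=rewrite | github.com/Sung-Jinw00/Codewars | python/functions/RoboScript/mise_en_page.py | find_last_brackets
-- ===== SOURCE A (Python) =====
-- def find_last_brackets(code, last=-10):
-- 	if last == -10:
-- 		last = len(code)
-- 	i = code[:last].rfind('(')
-- 	if i == -1:
-- 		return None, None
-- 	lvl = 1
-- 	for j in range(i + 1, len(code)):
-- 		if code[j] == '(':
-- 			lvl += 1
-- 		elif code[j] == ')':
-- 			lvl -= 1
-- 			if not lvl:
-- 				return i, j
-- 	return None, None
-- ===== SOURCE B (Python) =====
-- def find_last_brackets(code, last=-10):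
--     hi = len(code) if last == -10 else len(code[:last])
--     stack = []
--     pairs = {}
--     best = None
--     for j, c in enumerate(code):
--         if c == '(':
--             stack.append(j)
--             if j < hi:
--                 best = j
--         elif c == ')':
--             if stack:
--                 pairs[stack.pop()] = j
--     if best is None:
--         return None, None
--     if best in pairs:
--         return best, pairs[best]
--     return None, None
-- ===== Notes on version B (the rewrite author's own statement) =====
-- stated objective: alternative
-- what changed: Replaces A's rfind-then-forward-level-counting scan with a single left-to-right pass that maintains an explicit stack of open-paren indices, builds a dict of all matched open-to-close pairs, and tracks the rightmost open paren below the threshold, then answers by one dict lookup.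
import Mathlib
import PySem

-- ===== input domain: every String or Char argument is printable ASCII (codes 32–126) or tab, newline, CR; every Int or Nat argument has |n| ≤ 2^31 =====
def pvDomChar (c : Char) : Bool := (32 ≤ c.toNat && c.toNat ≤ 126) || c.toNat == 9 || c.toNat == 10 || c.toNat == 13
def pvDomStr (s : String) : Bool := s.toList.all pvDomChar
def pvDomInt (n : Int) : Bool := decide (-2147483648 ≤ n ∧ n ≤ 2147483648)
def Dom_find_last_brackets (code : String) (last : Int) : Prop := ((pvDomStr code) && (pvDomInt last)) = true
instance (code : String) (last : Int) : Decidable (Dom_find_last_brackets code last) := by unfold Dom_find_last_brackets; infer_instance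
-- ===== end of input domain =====

-- B replaces A's rfind + forward level-counting scan by one left-to-right pass with an explicit
-- stack of open-paren indices building a dict of all matched pairs plus the rightmost open paren
-- below the threshold, answered by a single lookup (alternative decomposition, same cost).


-- ===== PORT A =====
-- A's for-loop over range(i+1, len(code)) reading code[j], carried as the (index, char) pairs of
-- the suffix; `lvl` is the paren level, `some j` the early return at lvl = 0.
def findA_loop : List (Int × Char) → Int → Option Int
  | [], _ => none
  | (j, c) :: rest, lvl =>
    if c = '(' then findA_loop rest (lvl + 1)
    else if c = ')' then (if lvl - 1 = 0 then some j else findA_loop rest (lvl - 1))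
    else findA_loop rest lvl

def find_last_brackets (code : String) (last : Int) : Option Int × Option Int :=
  let l := code.toList
  let last' := if last = -10 then (l.length : Int) else last
  -- i = code[:last].rfind('(')
  let i := PySem.Chars.rfind (PySem.List.slice l none (some last')) ['(']
  if i = -1 then (none, none)
  else
    match findA_loop (PySem.List.enumerate (l.drop (i.toNat + 1)) ((i.toNat : Int) + 1)) 1 with
    | some j => (some i, some j)
    | none => (none, none)

-- ===== PORT B =====
-- pairs.get lookup (keys are distinct '(' indices, so first match is the dict value)
def lookupZ (i : Int) (p : List (Int × Int)) : Option Int := (p.find? (fun q => q.1 == i)).map (·.2)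

-- one step of B's for loop; state = (stack of open indices, pairs dict, best '(' below hi)
def stepB (hi : Int) (st : List Int × List (Int × Int) × Option Int) (jc : Int × Char) :
    List Int × List (Int × Int) × Option Int :=
  if jc.2 = '(' then (jc.1 :: st.1, st.2.1, if jc.1 < hi then some jc.1 else st.2.2)
  else if jc.2 = ')' then
    match st.1 with
    | [] => st
    | k :: stk => (stk, (k, jc.1) :: st.2.1, st.2.2)
  else st

def find_last_brackets_alt (code : String) (last : Int) : Option Int × Option Int :=
  let l := code.toList
  let hi := if last = -10 then (l.length : Int) else ((PySem.List.slice l none (some last)).length : Int)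
  let r := (PySem.List.enumerate l 0).foldl (stepB hi) ([], [], none)
  match r.2.2 with
  | none => (none, none)
  | some i =>
    match lookupZ i r.2.1 with
    | none => (none, none)
    | some j => (some i, some j)

-- ===== PRECONDITION & SPEC =====
def Spec_find_last_brackets (code : String) (last : Int) (out : Option Int × Option Int) : Prop := out = find_last_brackets_alt code last
instance (code : String) (last : Int) (out : Option Int × Option Int) : Decidable (Spec_find_last_brackets code last out) := by unfold Spec_find_last_brackets; infer_instance

-- ===== CLAIM (what is proved, stated in full; the proofs are below) =====
def Claim_equal_find_last_brackets : Prop := ∀ (code : String) (last : Int), Dom_find_last_brackets code last → Spec_find_last_brackets code last (find_last_brackets code last)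

-- ===== LEMMAS AND PROOFS =====

-- the largest index n < j with l[n] = c (fuel = j, scanning downwards like CPython's rfind)
def lastBelow (l : List Char) (c : Char) : Nat → Option Nat
  | 0 => none
  | j+1 => if l[j]? = some c then some j else lastBelow l c j

theorem isPrefixOf_single (c : Char) (t : List Char) : [c].isPrefixOf t = true ↔ t[0]? = some c := by
  rw [List.isPrefixOf_iff_prefix]
  cases t with
  | nil => simp
  | cons x xs => simp [List.cons_prefix_cons, eq_comm]

theorem rfind_go_zero (s sub : List Char) :
    PySem.Chars.rfind.go s sub 0 = if sub.isPrefixOf s then 0 else -1 := by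
  simp [PySem.Chars.rfind.go]

theorem rfind_go_succ (s sub : List Char) (j : Nat) :
    PySem.Chars.rfind.go s sub (j+1) =
      if sub.isPrefixOf (List.drop (j+1) s) then ((j+1 : Nat) : Int) else PySem.Chars.rfind.go s sub j := by
  simp [PySem.Chars.rfind.go]

theorem rfind_go_eq (s : List Char) (c : Char) :
    ∀ j, PySem.Chars.rfind.go s [c] j =
      (match lastBelow s c (j+1) with | some n => (n : Int) | none => -1) := by
  intro j
  induction j with
  | zero =>
    rw [rfind_go_zero]
    by_cases h : s[0]? = some c
    · simp [lastBelow, h, (isPrefixOf_single c s).2 h]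
    · have hp : [c].isPrefixOf s = false :=
        Bool.eq_false_iff.2 (fun hq => h ((isPrefixOf_single c s).1 hq))
      simp [lastBelow, h, hp]
  | succ j ih =>
    rw [rfind_go_succ]
    have hd : (s.drop (j+1))[0]? = s[j+1]? := by rw [List.getElem?_drop]
    by_cases h : s[j+1]? = some c
    · have hp : [c].isPrefixOf (s.drop (j+1)) = true := (isPrefixOf_single c _).2 (hd ▸ h)
      simp [hp, lastBelow, h]
    · have hp : [c].isPrefixOf (s.drop (j+1)) = false :=
        Bool.eq_false_iff.2 (fun hq => h (hd ▸ (isPrefixOf_single c _).1 hq))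
      simp only [hp, Bool.false_eq_true, if_false, ih]
      have : lastBelow s c (j+1+1) = lastBelow s c (j+1) := by
        simp [lastBelow, h]
      rw [this]

theorem lastBelow_nil (c : Char) : ∀ j, lastBelow [] c j = none := by
  intro j; induction j with
  | zero => rfl
  | succ j ih => simp [lastBelow, ih]

theorem rfind_eq_lastBelow (s : List Char) (c : Char) :
    PySem.Chars.rfind s [c] =
      (match lastBelow s c s.length with | some n => (n : Int) | none => -1) := by
  have h0 : PySem.Chars.rfind s [c] = PySem.Chars.rfind.go s [c] s.length := rfl
  rw [h0, rfind_go_eq s c s.length]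
  have : lastBelow s c (s.length + 1) = lastBelow s c s.length := by
    have hn : s[s.length]? = none := List.getElem?_eq_none le_rfl
    simp [lastBelow, hn]
  rw [this]

theorem lastBelow_take (l : List Char) (c : Char) (K : Nat) :
    ∀ j, j ≤ K → lastBelow (l.take K) c j = lastBelow l c j := by
  intro j
  induction j with
  | zero => intro _; rfl
  | succ j ih =>
    intro hj
    have hjK : j < K := hj
    have e : (l.take K)[j]? = l[j]? := by
      rw [List.getElem?_take]; simp [hjK]
    simp [lastBelow, e, ih (Nat.le_of_lt hj)]

theorem lastBelow_of_ge (l : List Char) (c : Char) :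
    ∀ j, l.length ≤ j → lastBelow l c j = lastBelow l c l.length := by
  intro j
  induction j with
  | zero => intro h; rw [Nat.le_zero.1 h]
  | succ j ih =>
    intro h
    rcases Nat.eq_or_lt_of_le h with h1 | h1
    · rw [h1]
    · have hn : l[j]? = none := List.getElem?_eq_none (by omega)
      simp [lastBelow, hn]
      exact ih (by omega)

theorem rfind_take (l : List Char) (c : Char) (K : Nat) :
    PySem.Chars.rfind (l.take K) [c] =
      (match lastBelow l c K with | some n => (n : Int) | none => -1) := by
  rw [rfind_eq_lastBelow]
  by_cases hK : K ≤ l.length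
  · have hlen : (l.take K).length = K := by simp [hK]
    rw [hlen, lastBelow_take l c K K le_rfl]
  · have ht : l.take K = l := List.take_of_length_le (by omega)
    rw [ht, lastBelow_of_ge l c K (by omega)]

theorem lastBelow_append (l : List Char) (x c : Char) :
    ∀ j, lastBelow (l ++ [x]) c j =
      if l.length < j ∧ x = c then some l.length else lastBelow l c j := by
  intro j
  induction j with
  | zero => simp [lastBelow]
  | succ j ih =>
    rcases lt_trichotomy j l.length with hj | hj | hj
    · have e : (l ++ [x])[j]? = l[j]? := by rw [List.getElem?_append_left hj]
      have h1 : ¬ (l.length < j) := by omega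
      have h2 : ¬ (l.length < j + 1) := by omega
      simp only [lastBelow, e, ih, h1, false_and, if_false, h2]
    · have e : (l ++ [x])[j]? = some x := by
        subst hj; rw [List.getElem?_append_right le_rfl]; simp
      by_cases hx : x = c
      · simp [lastBelow, e, hx, hj]
      · have hn : l[j]? = none := List.getElem?_eq_none (by omega)
        have h1 : ¬ (l.length < j) := by omega
        simp [lastBelow, e, hx, ih, h1, hn]
    · have e : (l ++ [x])[j]? = none := by
        apply List.getElem?_eq_none; simp; omega
      have en : l[j]? = none := List.getElem?_eq_none (by omega)
      have h1 : l.length < j + 1 := by omega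
      simp only [lastBelow, e, en, ih]
      by_cases hx : x = c <;> simp [hx, hj, h1]

theorem lastBelow_spec (l : List Char) (c : Char) :
    ∀ K n, lastBelow l c K = some n → l[n]? = some c ∧ n < K := by
  intro K
  induction K with
  | zero => intro n h; simp [lastBelow] at h
  | succ K ih =>
    intro n h
    by_cases hc : l[K]? = some c
    · simp [lastBelow, hc] at h
      exact ⟨h ▸ hc, by omega⟩
    · simp [lastBelow, hc] at h
      obtain ⟨h1, h2⟩ := ih n h
      exact ⟨h1, by omega⟩

-- the best-'(' component of B's fold is the rightmost '(' strictly below K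
theorem best_eq_lastBelow (K : Nat) :
    ∀ (l : List Char),
      ((PySem.List.enumerate l 0).foldl (stepB (K : Int)) ([], [], none)).2.2 =
        (lastBelow l '(' K).map (fun n => (n : Int)) := by
  intro l
  induction l using List.reverseRecOn with
  | nil => simp [PySem.List.enumerate, lastBelow_nil]
  | append_singleton l x ih =>
    rw [PySem.List.enumerate_append, List.foldl_append]
    have e1 : PySem.List.enumerate [x] (0 + (l.length : Int)) = [((l.length : Int), x)] := by
      simp [PySem.List.enumerate]
    rw [e1, List.foldl_cons, List.foldl_nil, lastBelow_append l x '(' K]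
    set F := (PySem.List.enumerate l 0).foldl (stepB (K : Int)) ([], [], none) with hF
    by_cases hx : x = '('
    · by_cases hK : l.length < K
      · have hc : (l.length : Int) < (K : Int) := by exact_mod_cast hK
        simp [stepB, hx, hc, hK]
      · have hc : ¬ ((l.length : Int) < (K : Int)) := by exact_mod_cast hK
        simp [stepB, hx, hc, hK, ih]
    · have hcond : ¬ (l.length < K ∧ x = '(') := by simp [hx]
      rw [if_neg hcond, ← ih]
      by_cases hy : x = ')'
      · rcases hFs : F.1 with _ | ⟨k, stk⟩ <;> simp [stepB, hx, hy, hFs]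
      · simp [stepB, hx, hy]

-- i is not on the stack and not a pairs key after folding, provided it was not before and does not occur in s
theorem stepB_notMem (hi : Int) :
    ∀ (s : List (Int × Char)) (st : List Int) (p : List (Int × Int)) (b : Option Int) (i : Int),
      i ∉ st → (∀ q ∈ p, q.1 ≠ i) → (∀ q ∈ s, q.1 ≠ i) →
      i ∉ (s.foldl (stepB hi) (st, p, b)).1 ∧ ∀ q ∈ (s.foldl (stepB hi) (st, p, b)).2.1, q.1 ≠ i := by
  intro s
  induction s with
  | nil => intro st p b i hst hp _; exact ⟨hst, hp⟩
  | cons q s ih =>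
    intro st p b i hst hp hs
    rcases q with ⟨j, ch⟩
    have hj : j ≠ i := hs (j, ch) (List.mem_cons_self ..)
    have hs' : ∀ q ∈ s, q.1 ≠ i := fun q hq => hs q (List.mem_cons_of_mem _ hq)
    rw [List.foldl_cons]
    by_cases h1 : ch = '('
    · rw [show stepB hi (st, p, b) (j, ch) = (j :: st, p, if j < hi then some j else b) by
        simp [stepB, h1]]
      exact ih _ _ _ i (by
        intro hmem
        rcases List.mem_cons.1 hmem with h | h
        · exact hj h.symm
        · exact hst h) hp hs'
    · by_cases h2 : ch = ')'
      · cases hstk : st with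
        | nil =>
          rw [show stepB hi ([], p, b) (j, ch) = ([], p, b) by simp [stepB, h1, h2]]
          exact ih _ _ _ i (by simp) hp hs'
        | cons k stk =>
          have hik : i ≠ k := fun h => (hstk ▸ hst) (h ▸ List.mem_cons_self ..)
          have hist : i ∉ stk := fun h => (hstk ▸ hst) (List.mem_cons_of_mem _ h)
          rw [show stepB hi (k :: stk, p, b) (j, ch) = (stk, (k, j) :: p, b) by simp [stepB, h1, h2]]
          refine ih _ _ _ i hist ?_ hs'
          intro q hq
          rcases List.mem_cons.1 hq with h | h
          · rw [h]; exact fun h' => hik h'.symm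
          · exact hp q h
      · rw [show stepB hi (st, p, b) (j, ch) = (st, p, b) by simp [stepB, h1, h2]]
        exact ih _ _ _ i hst hp hs'

theorem stepB_lookup_frozen (hi : Int) :
    ∀ (s : List (Int × Char)) (st : List Int) (p : List (Int × Int)) (b : Option Int) (i : Int),
      i ∉ st → (∀ q ∈ s, q.1 ≠ i) →
      lookupZ i (s.foldl (stepB hi) (st, p, b)).2.1 = lookupZ i p := by
  intro s
  induction s with
  | nil => intros; rfl
  | cons q s ih =>
    intro st p b i hst hs
    rcases q with ⟨j, ch⟩
    have hj : j ≠ i := hs (j, ch) (List.mem_cons_self ..)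
    have hs' : ∀ q ∈ s, q.1 ≠ i := fun q hq => hs q (List.mem_cons_of_mem _ hq)
    rw [List.foldl_cons]
    by_cases h1 : ch = '('
    · rw [show stepB hi (st, p, b) (j, ch) = (j :: st, p, if j < hi then some j else b) by
        simp [stepB, h1]]
      exact ih _ _ _ i (by
        intro hmem
        rcases List.mem_cons.1 hmem with h | h
        · exact hj h.symm
        · exact hst h) hs'
    · by_cases h2 : ch = ')'
      · cases hstk : st with
        | nil =>
          rw [show stepB hi ([], p, b) (j, ch) = ([], p, b) by simp [stepB, h1, h2]]
          exact ih _ _ _ i (by simp) hs'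
        | cons k stk =>
          have hik : i ≠ k := fun h => (hstk ▸ hst) (h ▸ List.mem_cons_self ..)
          have hist : i ∉ stk := fun h => (hstk ▸ hst) (List.mem_cons_of_mem _ h)
          rw [show stepB hi (k :: stk, p, b) (j, ch) = (stk, (k, j) :: p, b) by simp [stepB, h1, h2]]
          rw [ih _ _ _ i hist hs']
          have hk : (k == i) = false := beq_eq_false_iff_ne.2 (fun h => hik h.symm)
          simp [lookupZ, List.find?_cons, hk]
      · rw [show stepB hi (st, p, b) (j, ch) = (st, p, b) by simp [stepB, h1, h2]]
        exact ih _ _ _ i hst hs'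

-- the heart: once i sits below st0 on the stack, its eventual dict entry is exactly what A's
-- level counter (lvl = |st0| + 1) returns
theorem stepB_match (hi : Int) :
    ∀ (s : List (Int × Char)) (st0 st : List Int) (p : List (Int × Int)) (b : Option Int) (i : Int),
      (∀ q ∈ p, q.1 ≠ i) → i ∉ st0 → i ∉ st → (∀ q ∈ s, q.1 ≠ i) →
      lookupZ i ((s.foldl (stepB hi) (st0 ++ i :: st, p, b)).2.1) =
        findA_loop s ((st0.length : Int) + 1) := by
  intro s
  induction s with
  | nil =>
    intro st0 st p b i hp _ _ _
    have hn : (p.find? (fun q => q.1 == i)) = none :=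
      List.find?_eq_none.2 (fun q hq => by simpa using hp q hq)
    simp [lookupZ, findA_loop, hn]
  | cons q s ih =>
    intro st0 st p b i hp hst0 hst hs
    rcases q with ⟨j, ch⟩
    have hj : j ≠ i := hs (j, ch) (List.mem_cons_self ..)
    have hs' : ∀ q ∈ s, q.1 ≠ i := fun q hq => hs q (List.mem_cons_of_mem _ hq)
    rw [List.foldl_cons]
    by_cases h1 : ch = '('
    · rw [show stepB hi (st0 ++ i :: st, p, b) (j, ch) =
          ((j :: st0) ++ i :: st, p, if j < hi then some j else b) by simp [stepB, h1]]
      rw [ih (j :: st0) st p _ i hp (by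
        intro hmem
        rcases List.mem_cons.1 hmem with h | h
        · exact hj h.symm
        · exact hst0 h) hst hs']
      have harith : ((List.length (j :: st0) : Int) + 1) = ((st0.length : Int) + 1) + 1 := by
        simp only [List.length_cons]; push_cast; ring
      rw [harith]
      simp [findA_loop, h1]
    · by_cases h2 : ch = ')'
      · cases st0 with
        | nil =>
          rw [show stepB hi ([] ++ i :: st, p, b) (j, ch) = (st, (i, j) :: p, b) by
            simp [stepB, h1, h2]]
          rw [stepB_lookup_frozen hi s st ((i, j) :: p) b i hst hs']
          simp [lookupZ, findA_loop, h2]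
        | cons k st0' =>
          have hik : i ≠ k := fun h => hst0 (h ▸ List.mem_cons_self ..)
          have hist : i ∉ st0' := fun h => hst0 (List.mem_cons_of_mem _ h)
          rw [show stepB hi ((k :: st0') ++ i :: st, p, b) (j, ch) =
              (st0' ++ i :: st, (k, j) :: p, b) by simp [stepB, h1, h2]]
          rw [ih st0' st ((k, j) :: p) b i (by
            intro q hq
            rcases List.mem_cons.1 hq with h | h
            · rw [h]; exact fun h' => hik h'.symm
            · exact hp q h) hist hst hs']
          have hz : ¬ (((List.length (k :: st0') : Int) + 1) - 1 = 0) := by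
            simp only [List.length_cons]; push_cast; omega
          have harith : ((List.length (k :: st0') : Int) + 1) - 1 = (st0'.length : Int) + 1 := by
            simp only [List.length_cons]; push_cast; ring
          simp only [findA_loop]
          rw [if_neg h1, if_pos h2, if_neg hz, harith]
      · rw [show stepB hi (st0 ++ i :: st, p, b) (j, ch) = (st0 ++ i :: st, p, b) by
          simp [stepB, h1, h2]]
        rw [ih st0 st p b i hp hst0 hst hs']
        simp [findA_loop, h1, h2]

theorem slice_none_some_prefix {α : Type} (xs : List α) (b : Int) :
    PySem.List.slice xs none (some b) = xs.take (PySem.List.slice xs none (some b)).length := by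
  by_cases hb : 0 ≤ b
  · rw [PySem.List.slice_to xs hb, List.length_take]
    by_cases h : b.toNat ≤ xs.length
    · rw [Nat.min_eq_left h]
    · rw [Nat.min_eq_right (by omega), List.take_of_length_le (by omega), List.take_length]
  · have hb' : b < 0 := by omega
    have hk : b = -(((-b).toNat : Nat) : Int) := by omega
    rw [hk, PySem.List.slice_to_neg_natCast xs (-b).toNat (by omega), List.length_take,
      Nat.min_eq_left (Nat.sub_le _ _)]

-- both ports, with A's threshold expressed as the common prefix length K
theorem ports_agree_core (l : List Char) (K : Nat) :
    (if PySem.Chars.rfind (l.take K) ['('] = -1 then ((none, none) : Option Int × Option Int)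
     else
       match findA_loop (PySem.List.enumerate
           (l.drop ((PySem.Chars.rfind (l.take K) ['(']).toNat + 1))
           (((PySem.Chars.rfind (l.take K) ['(']).toNat : Int) + 1)) 1 with
       | some j => (some (PySem.Chars.rfind (l.take K) ['(']), some j)
       | none => (none, none)) =
    (match ((PySem.List.enumerate l 0).foldl (stepB (K : Int)) ([], [], none)).2.2 with
     | none => (none, none)
     | some i =>
       match lookupZ i ((PySem.List.enumerate l 0).foldl (stepB (K : Int)) ([], [], none)).2.1 with
       | none => (none, none)
       | some j => (some i, some j)) := by
  have hrf := rfind_take l '(' K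
  have hbest := best_eq_lastBelow K l
  rcases hlb : lastBelow l '(' K with _ | n
  · rw [hlb] at hrf hbest
    simp [hrf, hbest]
  · rw [hlb] at hrf hbest
    obtain ⟨hc, hnK⟩ := lastBelow_spec l '(' K n hlb
    have hrf' : PySem.Chars.rfind (l.take K) ['('] = (n : Int) := hrf
    have hbest' :
        ((PySem.List.enumerate l 0).foldl (stepB (K : Int)) ([], [], none)).2.2 = some (n : Int) :=
      hbest
    have hnl : n < l.length := by
      by_contra h
      rw [List.getElem?_eq_none (by omega)] at hc
      exact absurd hc (by simp)
    have hgl : l[n] = '(' := by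
      have := List.getElem?_eq_getElem hnl
      rw [this] at hc
      exact Option.some.inj hc
    have hne : ((n : Int)) ≠ -1 := by omega
    have htn : ((n : Int)).toNat = n := Int.toNat_natCast n
    have hsplit : PySem.List.enumerate l 0 =
        PySem.List.enumerate (l.take n) 0 ++
          ((n : Int), '(') :: PySem.List.enumerate (l.drop (n + 1)) ((n : Int) + 1) := by
      conv_lhs => rw [← List.take_append_drop n l, ← List.getElem_cons_drop hnl]
      rw [PySem.List.enumerate_append, PySem.List.enumerate_cons, hgl]
      have hlen : (l.take n).length = n := by simp [Nat.le_of_lt hnl]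
      rw [hlen]
      norm_num
    rcases hFq : (PySem.List.enumerate (l.take n) 0).foldl (stepB (K : Int)) ([], [], none)
      with ⟨Fst, Fp, Fb⟩
    have hpref : ∀ q ∈ PySem.List.enumerate (l.take n) 0, q.1 ≠ (n : Int) := by
      intro q hq
      obtain ⟨k, hk, hq'⟩ := (PySem.List.mem_enumerate_iff _ _ _).1 hq
      have hkn : k < n := by
        have : (l.take n).length = n := by simp [Nat.le_of_lt hnl]
        omega
      rw [hq']
      simp
      omega
    have hnm := stepB_notMem (K : Int) (PySem.List.enumerate (l.take n) 0) [] [] none (n : Int)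
      (by simp) (by simp) hpref
    rw [hFq] at hnm
    have hstep : stepB (K : Int) (Fst, Fp, Fb) ((n : Int), '(') =
        ((n : Int) :: Fst, Fp, if (n : Int) < (K : Int) then some (n : Int) else Fb) := by
      simp [stepB]
    have hsuffix : ∀ q ∈ PySem.List.enumerate (l.drop (n + 1)) ((n : Int) + 1), q.1 ≠ (n : Int) := by
      intro q hq
      obtain ⟨k, hk, hq'⟩ := (PySem.List.mem_enumerate_iff _ _ _).1 hq
      rw [hq']
      simp
      omega
    have hmatch := stepB_match (K : Int) (PySem.List.enumerate (l.drop (n + 1)) ((n : Int) + 1))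
      [] Fst Fp (if (n : Int) < (K : Int) then some (n : Int) else Fb) (n : Int)
      hnm.2 (by simp) hnm.1 hsuffix
    simp only [List.nil_append, List.length_nil, Nat.cast_zero, zero_add] at hmatch
    rw [hsplit, List.foldl_append, hFq, List.foldl_cons, hstep] at hbest' ⊢
    rw [hrf', if_neg hne, htn, hbest']
    simp only [hmatch]
    rcases findA_loop (PySem.List.enumerate (l.drop (n + 1)) ((n : Int) + 1)) 1 with _ | j
    · rfl
    · rfl

-- ===== VERDICT (by name: the statement is the Claim_ definition above) =====
theorem find_last_brackets_spec : Claim_equal_find_last_brackets := by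
  intro code last _
  unfold Spec_find_last_brackets
  show find_last_brackets code last = find_last_brackets_alt code last
  unfold find_last_brackets find_last_brackets_alt
  by_cases hl : last = -10
  · simp only [hl, reduceIte]
    rw [PySem.List.slice_to_natCast, List.take_length]
    have h := ports_agree_core code.toList code.toList.length
    rw [List.take_length] at h
    exact h
  · simp only [if_neg hl]
    have hs := slice_none_some_prefix code.toList last
    set K := (PySem.List.slice code.toList none (some last)).length with hK
    rw [hs]
    exact ports_agree_core code.toList K
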